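-- pv_equiv track=rewrite | github.com/RyanKelleyCosing/hybrid-document-intelligence-platform | src/document_intelligence/account_matching.py | normalize_match_text
-- ===== SOURCE A (Python) =====
-- def normalize_match_text(value: str | None) -> str:
--     """Normalize text for fuzzy comparisons."""
--     if not value:
--         return ""
--
--     characters = [
--         character.lower() if character.isalnum() else " "
--         for character in value
--     ]
--     return " ".join("".join(characters).split())
-- ===== SOURCE B (Python) =====
-- def normalize_match_text(value):
--     """Normalize text for fuzzy comparisons (single-pass token scanner)."""
--     if not value:
--         return ""
--     words = []
--     i = 0
--     n = len(value)
--     while i < n: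
--         if value[i].isalnum():
--             j = i
--             while j < n and value[j].isalnum():
--                 j += 1
--             words.append(value[i:j].lower())
--             i = j
--         else:
--             i += 1
--     return " ".join(words)
-- ===== Notes on version B (the rewrite author's own statement) =====
-- stated objective: alternative
-- what changed: Replaced the map-every-char / join / split / rejoin pipeline by a single-pass index scanner that extracts alnum runs as slices and lowercases each run.
import Mathlib
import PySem

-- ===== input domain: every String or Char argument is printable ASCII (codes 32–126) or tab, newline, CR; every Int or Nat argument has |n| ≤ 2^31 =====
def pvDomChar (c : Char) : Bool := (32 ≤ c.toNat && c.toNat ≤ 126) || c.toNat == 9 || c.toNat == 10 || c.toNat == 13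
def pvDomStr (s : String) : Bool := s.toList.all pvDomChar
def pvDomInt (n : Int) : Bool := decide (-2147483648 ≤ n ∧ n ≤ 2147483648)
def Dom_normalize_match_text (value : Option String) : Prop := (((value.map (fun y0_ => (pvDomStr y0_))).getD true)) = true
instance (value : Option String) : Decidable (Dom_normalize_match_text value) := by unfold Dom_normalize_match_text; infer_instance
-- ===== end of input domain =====

-- B rebuilds the result by a single-pass token scan instead of A's map/join/split/rejoin pipeline; return values proved identical.

-- ===== PORT A =====
-- per-character normalization: lower if alnum, else a space (A's list comprehension body)
def pvNormChar (c : Char) : Char :=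
  if PySem.Chars.isalnum c then PySem.Chars.lowerChar c else ' '

def normalize_match_text (value : Option String) : String :=
  match value with
  | none => ""
  | some s =>
    if s = "" then ""
    else
      let characters : List Char := s.toList.map pvNormChar
      -- " ".join("".join(characters).split())
      String.ofList (PySem.Chars.join [' ']
        (PySem.Chars.split₀ (PySem.Chars.join [] (characters.map (fun c => [c])))))

-- ===== PORT B =====
-- B's scanner: skip non-alnum chars; at an alnum char take the whole alnum run
-- (the inner `while j < n and value[j].isalnum()` / `value[i:j]`), lowercase it, continue after it.
def pvScanWords (cs : List Char) : List (List Char) :=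
  match cs with
  | [] => []
  | c :: rest =>
    if PySem.Chars.isalnum c then
      ((c :: rest).takeWhile PySem.Chars.isalnum).map PySem.Chars.lowerChar
        :: pvScanWords ((c :: rest).dropWhile PySem.Chars.isalnum)
    else
      pvScanWords rest
  termination_by cs.length
  decreasing_by
    · simp only [List.dropWhile_cons, *, if_pos]
      exact Nat.lt_succ_of_le (List.length_dropWhile_le _ _)
    · simp

def normalize_match_text_alt (value : Option String) : String :=
  match value with
  | none => ""
  | some s =>
    if s = "" then ""
    else String.ofList (PySem.Chars.join [' '] (pvScanWords s.toList))

-- ===== PRECONDITION & SPEC =====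
def Spec_normalize_match_text (value : Option String) (out : String) : Prop := out = normalize_match_text_alt value
instance (value : Option String) (out : String) : Decidable (Spec_normalize_match_text value out) := by unfold Spec_normalize_match_text; infer_instance

-- ===== CLAIM (what is proved, stated in full; the proofs are below) =====
def Claim_equal_normalize_match_text : Prop := ∀ (value : Option String), Dom_normalize_match_text value → Spec_normalize_match_text value (normalize_match_text value)

-- ===== LEMMAS AND PROOFS =====

-- one-step unfolding of split₀.go (structural recursion, so rfl)
theorem pv_go_nil (cur : List Char) (acc : List (List Char)) :
    PySem.Chars.split₀.go [] cur acc =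
      if cur.isEmpty then acc.reverse else (cur.reverse :: acc).reverse := rfl

theorem pv_go_cons (c : Char) (rest cur : List Char) (acc : List (List Char)) :
    PySem.Chars.split₀.go (c :: rest) cur acc =
      if PySem.Chars.isspace c then
        (if cur.isEmpty then PySem.Chars.split₀.go rest [] acc
         else PySem.Chars.split₀.go rest [] (cur.reverse :: acc))
      else PySem.Chars.split₀.go rest (c :: cur) acc := rfl

-- any char whose code is in [48,122] is not Python whitespace
theorem pv_isspace_false_of_range (c : Char) (h1 : 48 ≤ c.toNat) (h2 : c.toNat ≤ 122) :
    PySem.Chars.isspace c = false := by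
  simp only [PySem.Chars.isspace, Bool.or_eq_false_iff, Bool.and_eq_false_iff,
    decide_eq_false_iff_not]
  omega

-- a lowered alnum char is not whitespace
theorem pv_lower_alnum_not_space (c : Char) (h : PySem.Chars.isalnum c = true) :
    PySem.Chars.isspace (PySem.Chars.lowerChar c) = false := by
  simp only [PySem.Chars.isalnum, PySem.Chars.isalpha, PySem.Chars.isupper,
    PySem.Chars.islower, PySem.Chars.isdigit, Bool.or_eq_true, Bool.and_eq_true,
    decide_eq_true_eq] at h
  unfold PySem.Chars.lowerChar PySem.Chars.isupper
  by_cases hu : 'A' ≤ c ∧ c ≤ 'Z'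
  · rw [if_pos (by simp [decide_eq_true_eq]; exact ⟨hu.1, hu.2⟩)]
    have h1 : 65 ≤ c.toNat := hu.1
    have h2 : c.toNat ≤ 90 := hu.2
    have hv : (c.toNat + 32).isValidChar := Or.inl (by omega)
    have ht : (Char.ofNat (c.toNat + 32)).toNat = c.toNat + 32 := by
      simp [Char.toNat_ofNat, hv]
    exact pv_isspace_false_of_range _ (by omega) (by omega)
  · rw [if_neg (by simpa [decide_eq_true_eq] using hu)]
    rcases h with (⟨ha, hb⟩ | ⟨ha, hb⟩) | ⟨ha, hb⟩
    · exact absurd ⟨ha, hb⟩ hu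
    · have ha' : 97 ≤ c.toNat := ha
      have hb' : c.toNat ≤ 122 := hb
      exact pv_isspace_false_of_range c (by omega) hb'
    · have ha' : 48 ≤ c.toNat := ha
      have hb' : c.toNat ≤ 57 := hb
      exact pv_isspace_false_of_range c ha' (by omega)

-- the not-a-space test after A's per-char map IS the alnum test on the original char
theorem pv_notspace_comp_norm :
    ((fun c => !PySem.Chars.isspace c) ∘ pvNormChar) = PySem.Chars.isalnum := by
  funext c
  by_cases h : PySem.Chars.isalnum c = true
  · simp [pvNormChar, h, pv_lower_alnum_not_space c h]
  · simp only [Bool.not_eq_true] at h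
    simp [pvNormChar, h, PySem.Chars.isspace]

-- split₀.go: the accumulator factors out
theorem pv_go_acc (s : List Char) (cur : List Char) (acc : List (List Char)) :
    PySem.Chars.split₀.go s cur acc = acc.reverse ++ PySem.Chars.split₀.go s cur [] := by
  induction s generalizing cur acc with
  | nil => rw [pv_go_nil, pv_go_nil]; split_ifs <;> simp
  | cons c rest ih =>
    rw [pv_go_cons, pv_go_cons]
    by_cases hs : PySem.Chars.isspace c = true
    · rw [if_pos hs, if_pos hs]
      by_cases h : cur.isEmpty = true
      · rw [if_pos h, if_pos h]; exact ih [] acc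
      · rw [if_neg h, if_neg h, ih [] (cur.reverse :: acc), ih [] [cur.reverse]]; simp
    · rw [if_neg hs, if_neg hs]; exact ih (c :: cur) acc

-- split₀ drops a leading space
theorem pv_split₀_space (c : Char) (s : List Char) (hs : PySem.Chars.isspace c = true) :
    PySem.Chars.split₀ (c :: s) = PySem.Chars.split₀ s := by
  show PySem.Chars.split₀.go (c :: s) [] [] = PySem.Chars.split₀.go s [] []
  rw [pv_go_cons, if_pos hs]; rfl

-- split₀.go with a pending nonempty word: the word closes at the next space
theorem pv_go_pending (s : List Char) (cur : List Char) (h : cur ≠ []) :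
    PySem.Chars.split₀.go s cur [] =
      (cur.reverse ++ s.takeWhile (fun c => !PySem.Chars.isspace c))
        :: PySem.Chars.split₀ (s.dropWhile (fun c => !PySem.Chars.isspace c)) := by
  induction s generalizing cur with
  | nil =>
    rw [pv_go_nil, if_neg (by simpa [List.isEmpty_iff] using h)]
    simp [PySem.Chars.split₀, pv_go_nil]
  | cons c rest ih =>
    by_cases hs : PySem.Chars.isspace c = true
    · rw [pv_go_cons, if_pos hs, if_neg (by simpa [List.isEmpty_iff] using h),
          pv_go_acc rest [] [cur.reverse]]
      have hsp : PySem.Chars.split₀ rest = PySem.Chars.split₀.go rest [] [] := rfl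
      simp [hs, pv_split₀_space c rest hs, hsp]
    · rw [pv_go_cons, if_neg hs, ih (c :: cur) (by simp)]
      simp [hs]

-- split₀ at a non-space head: first word = the maximal non-space run
theorem pv_split₀_word (c : Char) (s : List Char) (hs : PySem.Chars.isspace c = false) :
    PySem.Chars.split₀ (c :: s) =
      (c :: s.takeWhile (fun c => !PySem.Chars.isspace c))
        :: PySem.Chars.split₀ (s.dropWhile (fun c => !PySem.Chars.isspace c)) := by
  show PySem.Chars.split₀.go (c :: s) [] [] = _
  rw [pv_go_cons, if_neg (by simp [hs]), pv_go_pending s [c] (by simp)]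
  simp

-- main lemma: A's split of the mapped string IS B's scanner word list
theorem pv_split₀_map_eq_scan (cs : List Char) :
    PySem.Chars.split₀ (cs.map pvNormChar) = pvScanWords cs := by
  induction cs using pvScanWords.induct with
  | case1 => rw [List.map_nil, pvScanWords]; rfl
  | case2 c rest h ih =>
    have hlc : pvNormChar c = PySem.Chars.lowerChar c := by simp [pvNormChar, h]
    have hns : PySem.Chars.isspace (PySem.Chars.lowerChar c) = false :=
      pv_lower_alnum_not_space c h
    rw [List.map_cons, hlc, pv_split₀_word _ _ hns,
        List.takeWhile_map, List.dropWhile_map, pv_notspace_comp_norm]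
    rw [List.dropWhile_cons, if_pos h] at ih
    rw [ih]
    have htw : (rest.takeWhile PySem.Chars.isalnum).map pvNormChar
        = (rest.takeWhile PySem.Chars.isalnum).map PySem.Chars.lowerChar := by
      apply List.map_congr_left
      intro x hx
      simp [pvNormChar, List.mem_takeWhile_imp hx]
    rw [pvScanWords, if_pos h]
    simp [htw, h]
  | case3 c rest h ih =>
    have hsp : pvNormChar c = ' ' := by simp [pvNormChar, h]
    rw [List.map_cons, hsp, pv_split₀_space _ _ (by decide), ih, pvScanWords, if_neg (by simp [h])]

-- ===== VERDICT (by name: the statement is the Claim_ definition above) =====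
theorem normalize_match_text_spec : Claim_equal_normalize_match_text := by
  intro value _
  unfold Spec_normalize_match_text normalize_match_text normalize_match_text_alt
  match value with
  | none => rfl
  | some s =>
    by_cases h : s = ""
    · simp [h]
    · simp only [h, ite_false]
      rw [PySem.Chars.join_nil_singletons, pv_split₀_map_eq_scan]
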